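-- pv_equiv track=rewrite | github.com/ponyo0818/LeetCode | LeetCode/Interview/MeanOrderSort.py | meanOrderSort
-- ===== SOURCE A (Python) =====
-- def meanOrderSort(theArray):
-- 	sortedArraySmallToLargest = sorted(theArray)
-- 	outputArray = []
-- 	startIndex = 0
-- 	lastIndex = len(sortedArraySmallToLargest)-1
-- 	while startIndex<lastIndex:
-- 		outputArray.append(sortedArraySmallToLargest[lastIndex]) # largest
-- 		outputArray.append(sortedArraySmallToLargest[startIndex]) # Second
-- 		lastIndex-=1
-- 		startIndex+=1
-- 	if startIndex==lastIndex:
-- 		outputArray.append(sortedArraySmallToLargest[lastIndex])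
-- 	return outputArray
-- ===== SOURCE B (Python) =====
-- def meanOrderSort(theArray):
--     # Selection-based: no sorting at all; repeatedly extract the max, then the
--     # min, of what remains, appending each as it is removed.
--     remaining = list(theArray)
--     output = []
--     while remaining:
--         largest = max(remaining)
--         remaining.remove(largest)
--         output.append(largest)
--         if remaining:
--             smallest = min(remaining)
--             remaining.remove(smallest)
--             output.append(smallest)
--     return output
-- ===== Notes on version B (the rewrite author's own statement) =====
-- stated objective: alternative
-- what changed: drops the sort entirely: instead of sorting and walking two pointers inward, B repeatedly selects and removes the maximum and then the minimum of the remaining elements (selection by repeated max/min extraction), appending them as extracted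
import Mathlib
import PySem

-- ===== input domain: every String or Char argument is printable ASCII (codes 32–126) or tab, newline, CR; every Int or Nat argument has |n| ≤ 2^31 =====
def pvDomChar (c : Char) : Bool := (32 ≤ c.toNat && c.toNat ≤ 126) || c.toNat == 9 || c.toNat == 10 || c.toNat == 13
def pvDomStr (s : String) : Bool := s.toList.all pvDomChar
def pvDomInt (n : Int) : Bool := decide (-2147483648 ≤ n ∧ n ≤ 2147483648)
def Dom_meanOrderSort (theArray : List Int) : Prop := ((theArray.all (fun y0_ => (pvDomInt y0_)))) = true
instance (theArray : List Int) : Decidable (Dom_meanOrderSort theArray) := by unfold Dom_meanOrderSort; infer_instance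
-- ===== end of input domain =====

-- B drops the sort: it repeatedly extracts the max, then the min, of the remaining elements (selection); a different algorithm with the same return value.

-- ===== PORT A =====
-- A's while loop: appends s[lastIndex] then s[startIndex], moving the pointers inward.
-- Indices are always in range when the loop body runs, so pyGetD with default 0 is exact.
def msLoopA (s : List Int) (startIndex lastIndex : Int) : List Int :=
  if startIndex < lastIndex then
    PySem.List.pyGetD s lastIndex 0 :: PySem.List.pyGetD s startIndex 0 ::
      msLoopA s (startIndex + 1) (lastIndex - 1)
  else if startIndex = lastIndex then [PySem.List.pyGetD s lastIndex 0] else []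
termination_by (lastIndex - startIndex).toNat
decreasing_by omega

def meanOrderSort (theArray : List Int) : List Int :=
  let sortedArraySmallToLargest := PySem.List.sorted theArray (fun x => x)
  msLoopA sortedArraySmallToLargest 0 ((sortedArraySmallToLargest.length : Int) - 1)

-- ===== PORT B =====
-- Termination helper for B's loop (cited by decreasing_by): removing from a nonempty list shrinks it.
lemma pvLenRemoveGetDLt (xs : List Int) (v : Int) (hne : xs ≠ []) :
    ((PySem.List.remove? xs v).getD []).length < xs.length := by
  cases h : PySem.List.remove? xs v with
  | none =>
    have : 0 < xs.length := List.length_pos_iff.mpr hne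
    simpa using this
  | some ys =>
    have hv : v ∈ xs := by
      by_contra hv
      rw [(PySem.List.remove?_eq_none_iff xs v).mpr hv] at h
      cases h
    rw [PySem.List.remove?_eq_some_erase xs v hv] at h
    injection h with h
    subst h
    have : 0 < xs.length := List.length_pos_iff.mpr hne
    simp only [Option.getD_some, List.length_erase_of_mem hv]
    omega

-- Source B's while loop. max(remaining)/min(remaining) run only under the nonemptiness guards,
-- so maxD/minD with default 0 are exact there; remaining.remove(v) runs only with v known
-- present, so (remove? …).getD [] is exact there.
def msLoopB (remaining : List Int) : List Int :=
  if h : remaining = [] then []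
  else
    let largest := PySem.List.maxD remaining (fun x => x) 0
    let rem1 := (PySem.List.remove? remaining largest).getD []
    if h1 : rem1 = [] then [largest]
    else
      let smallest := PySem.List.minD rem1 (fun x => x) 0
      let rem2 := (PySem.List.remove? rem1 smallest).getD []
      largest :: smallest :: msLoopB rem2
termination_by remaining.length
decreasing_by exact Nat.lt_trans (pvLenRemoveGetDLt _ _ h1) (pvLenRemoveGetDLt _ _ h)

def meanOrderSort_alt (theArray : List Int) : List Int :=
  msLoopB theArray

-- ===== PRECONDITION & SPEC =====
def Spec_meanOrderSort (theArray : List Int) (out : List Int) : Prop := out = meanOrderSort_alt theArray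
instance (theArray : List Int) (out : List Int) : Decidable (Spec_meanOrderSort theArray out) := by unfold Spec_meanOrderSort; infer_instance

-- ===== CLAIM (what is proved, stated in full; the proofs are below) =====
def Claim_equal_meanOrderSort : Prop := ∀ (theArray : List Int), Dom_meanOrderSort theArray → Spec_meanOrderSort theArray (meanOrderSort theArray)

-- ===== LEMMAS AND PROOFS =====

-- Common intermediate both ports are reduced to: peel the last (max) and head (min) of a list.
def gSpec : List Int → List Int
  | [] => []
  | [x] => [x]
  | x :: y :: rest => (y :: rest).getLastD 0 :: x :: gSpec ((y :: rest).dropLast)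
termination_by l => l.length
decreasing_by simp

lemma le_getLast_of_pairwise (l : List Int) (hp : l.Pairwise (· ≤ ·)) :
    ∀ x ∈ l, ∀ (h : l ≠ []), x ≤ l.getLast h := by
  induction l with
  | nil => intro x hx; cases hx
  | cons a t ih =>
    intro x hx h
    by_cases ht : t = []
    · subst ht
      simp at hx
      simp [hx]
    · rw [List.getLast_cons ht]
      rcases List.mem_cons.mp hx with rfl | hxt
      · exact List.rel_of_pairwise_cons hp (List.getLast_mem ht)
      · exact ih hp.tail x hxt ht

lemma erase_getLast_of_pairwise (l : List Int) (hp : l.Pairwise (· ≤ ·)) (h : l ≠ []) :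
    l.erase (l.getLast h) = l.dropLast := by
  induction l with
  | nil => cases h rfl
  | cons a t ih =>
    by_cases ht : t = []
    · subst ht; simp
    · have hlast : (a :: t).getLast h = t.getLast ht := List.getLast_cons ht
      rw [hlast, List.dropLast_cons_of_ne_nil ht]
      by_cases ha : a = t.getLast ht
      · -- every element equals a: both sides are a replicate of a
        have hall : ∀ x ∈ t, x = a := by
          intro x hx
          have h1 : x ≤ (a :: t).getLast h :=
            le_getLast_of_pairwise _ hp x (List.mem_cons_of_mem a hx) h
          rw [hlast, ← ha] at h1
          exact le_antisymm h1 (List.rel_of_pairwise_cons hp hx)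
        rw [← ha, List.erase_cons_head]
        have h2 : t = List.replicate t.length a := List.eq_replicate_of_mem hall
        have h3 : a :: t.dropLast = List.replicate (t.dropLast.length + 1) a := by
          have hmem : ∀ x ∈ a :: t.dropLast, x = a := by
            intro x hx
            rcases List.mem_cons.mp hx with rfl | hx'
            · rfl
            · exact hall x ((List.dropLast_sublist t).subset hx')
          simpa using List.eq_replicate_of_mem hmem
        have hlen : t.dropLast.length + 1 = t.length := by
          cases t with
          | nil => exact absurd rfl ht
          | cons b t' => simp
        rw [h3, hlen]
        exact h2
      · rw [List.erase_cons_tail (by simpa using ha), ih hp.tail ht]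

-- The first maximal element's value is the last element of the ascending sort.
lemma max_eq_getLast_sorted (xs : List Int) (m : Int)
    (h : PySem.List.max? xs (fun x => x) = some m)
    (hs : PySem.List.sorted xs (fun x => x) ≠ []) :
    (PySem.List.sorted xs (fun x => x)).getLast hs = m := by
  apply le_antisymm
  · exact PySem.List.max?_isMax h _
      ((PySem.List.mem_sorted xs (fun x => x) false _).mp (List.getLast_mem hs))
  · exact le_getLast_of_pairwise _ (PySem.List.sorted_pairwise xs (fun x => x)) m
      ((PySem.List.mem_sorted xs (fun x => x) false m).mpr (PySem.List.max?_mem h)) hs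

-- Removing (the first occurrence of) the maximum drops the last element of the sort.
lemma sorted_erase_max (xs : List Int) (m : Int)
    (h : PySem.List.max? xs (fun x => x) = some m) :
    PySem.List.sorted (xs.erase m) (fun x => x) =
      (PySem.List.sorted xs (fun x => x)).dropLast := by
  have hm : m ∈ xs := PySem.List.max?_mem h
  have hs : PySem.List.sorted xs (fun x => x) ≠ [] := by
    rw [Ne, PySem.List.sorted_eq_nil_iff]
    rintro rfl; cases hm
  have hp := PySem.List.sorted_pairwise xs (fun x => x)
  apply PySem.List.sorted_id_eq_of_perm_of_pairwise
  · rw [← erase_getLast_of_pairwise _ hp hs, max_eq_getLast_sorted xs m h hs]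
    exact (PySem.List.sorted_perm xs (fun x => x) false).erase m
  · exact List.Pairwise.sublist (List.dropLast_sublist _) hp

-- Removing (the first occurrence of) the minimum drops the head of the sort.
lemma sorted_erase_min (xs : List Int) (m : Int)
    (h : PySem.List.min? xs (fun x => x) = some m) :
    PySem.List.sorted (xs.erase m) (fun x => x) =
      (PySem.List.sorted xs (fun x => x)).tail := by
  have hm : m ∈ xs := PySem.List.min?_mem h
  have hs : PySem.List.sorted xs (fun x => x) ≠ [] := by
    rw [Ne, PySem.List.sorted_eq_nil_iff]
    rintro rfl; cases hm
  obtain ⟨a, t, hat⟩ := List.exists_cons_of_ne_nil hs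
  have ham : a = m := by
    apply le_antisymm
    · exact PySem.List.key_head_sorted_le xs (fun x => x) hat m hm
    · exact PySem.List.min?_isMin h a
        ((PySem.List.mem_sorted xs (fun x => x) false a).mp (hat ▸ List.mem_cons_self))
  apply PySem.List.sorted_id_eq_of_perm_of_pairwise
  · have htl : (PySem.List.sorted xs (fun x => x)).tail =
        (PySem.List.sorted xs (fun x => x)).erase m := by
      rw [hat, ham]
      simp
    rw [htl]
    exact (PySem.List.sorted_perm xs (fun x => x) false).erase m
  · exact List.Pairwise.sublist (List.tail_sublist _)
      (PySem.List.sorted_pairwise xs (fun x => x))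

lemma pyGetD_eq_getElem (s : List Int) (i : Int) (h0 : 0 ≤ i) (h1 : i.toNat < s.length) :
    PySem.List.pyGetD s i 0 = s[i.toNat] := by
  have hi : i = (i.toNat : Int) := by omega
  conv_lhs => rw [hi]
  rw [PySem.List.pyGetD_natCast, List.getD_eq_getElem s 0 h1]

-- A's inner loop on interior indices equals the loop on the list with both ends removed.
lemma msLoopA_shift : ∀ (n : Nat) (s : List Int) (i j : Int), (j - i).toNat ≤ n →
    1 ≤ i → j ≤ (s.length : Int) - 2 →
    msLoopA s i j = msLoopA s.tail.dropLast (i - 1) (j - 1) := by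
  intro n
  induction n with
  | zero =>
    intro s i j hn hi hj
    have hij : ¬ i < j := by omega
    conv_lhs => rw [msLoopA]
    conv_rhs => rw [msLoopA]
    rw [if_neg hij, if_neg (by omega : ¬ i - 1 < j - 1)]
    by_cases he : i = j
    · rw [if_pos he, if_pos (by omega : i - 1 = j - 1)]
      have hlen : s.tail.dropLast.length = s.length - 1 - 1 := by simp
      rw [pyGetD_eq_getElem s j (by omega) (by omega),
        pyGetD_eq_getElem _ (j - 1) (by omega) (by omega)]
      simp only [List.getElem_dropLast, List.getElem_tail]
      have hix : (j - 1).toNat + 1 = j.toNat := by omega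
      simp only [hix]
    · rw [if_neg he, if_neg (by omega : ¬ i - 1 = j - 1)]
  | succ n ih =>
    intro s i j hn hi hj
    by_cases hij : i < j
    · conv_lhs => rw [msLoopA]
      conv_rhs => rw [msLoopA]
      rw [if_pos hij, if_pos (by omega : i - 1 < j - 1)]
      have hlen : s.tail.dropLast.length = s.length - 1 - 1 := by simp
      have hjv : PySem.List.pyGetD s j 0 = PySem.List.pyGetD s.tail.dropLast (j - 1) 0 := by
        rw [pyGetD_eq_getElem s j (by omega) (by omega),
          pyGetD_eq_getElem _ (j - 1) (by omega) (by omega)]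
        simp only [List.getElem_dropLast, List.getElem_tail]
        have hix : (j - 1).toNat + 1 = j.toNat := by omega
        simp only [hix]
      have hiv : PySem.List.pyGetD s i 0 = PySem.List.pyGetD s.tail.dropLast (i - 1) 0 := by
        rw [pyGetD_eq_getElem s i (by omega) (by omega),
          pyGetD_eq_getElem _ (i - 1) (by omega) (by omega)]
        simp only [List.getElem_dropLast, List.getElem_tail]
        have hix : (i - 1).toNat + 1 = i.toNat := by omega
        simp only [hix]
      have ha1 : ((j - 1) - (i + 1)).toNat ≤ n := by omega
      have ha2 : (1 : Int) ≤ i + 1 := by omega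
      have ha3 : j - 1 ≤ (s.length : Int) - 2 := by omega
      rw [hjv, hiv, ih s (i + 1) (j - 1) ha1 ha2 ha3,
        show (i + 1 - 1 : Int) = i - 1 + 1 from by ring]
    · conv_lhs => rw [msLoopA]
      conv_rhs => rw [msLoopA]
      rw [if_neg hij, if_neg (by omega : ¬ i - 1 < j - 1)]
      by_cases he : i = j
      · rw [if_pos he, if_pos (by omega : i - 1 = j - 1)]
        have hlen : s.tail.dropLast.length = s.length - 1 - 1 := by simp
        rw [pyGetD_eq_getElem s j (by omega) (by omega),
          pyGetD_eq_getElem _ (j - 1) (by omega) (by omega)]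
        simp only [List.getElem_dropLast, List.getElem_tail]
        have hix : (j - 1).toNat + 1 = j.toNat := by omega
        simp only [hix]
      · rw [if_neg he, if_neg (by omega : ¬ i - 1 = j - 1)]

lemma getLastD_cons_eq_getElem (b : Int) (t : List Int) :
    (b :: t).getLastD 0 = (b :: t)[t.length]'(by simp) := by
  rw [List.getLastD_eq_getLast?, List.getLast?_eq_getLast (l := b :: t) (by simp),
    Option.getD_some, List.getLast_eq_getElem]
  simp
  rfl

-- A's loop over the whole sorted list computes gSpec.
lemma msLoopA_eq_g : ∀ (n : Nat) (s : List Int), s.length ≤ n →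
    msLoopA s 0 ((s.length : Int) - 1) = gSpec s := by
  intro n
  induction n with
  | zero =>
    intro s hs
    have hnil : s = [] := List.length_eq_zero_iff.mp (Nat.le_zero.mp hs)
    subst hnil
    rw [msLoopA]
    norm_num [gSpec]
  | succ n ih =>
    intro s hs
    match s with
    | [] => rw [msLoopA]; norm_num [gSpec]
    | [x] =>
      rw [msLoopA]
      norm_num [gSpec, PySem.List.pyGetD_natCast]
    | a :: b :: t =>
      have hlen : (a :: b :: t).length = t.length + 2 := by simp
      have hd : (b :: t).dropLast.length = t.length := by simp
      rw [msLoopA, if_pos (by rw [hlen]; push_cast; omega :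
        (0 : Int) < ((a :: b :: t).length : Int) - 1)]
      have hshift : msLoopA (a :: b :: t) (0 + 1) (((a :: b :: t).length : Int) - 1 - 1) =
          msLoopA (b :: t).dropLast 0 ((((b :: t).dropLast.length : Int)) - 1) := by
        rw [show (0 : Int) + 1 = 1 from by ring,
          show ((a :: b :: t).length : Int) - 1 - 1 = ((a :: b :: t).length : Int) - 2 from by
            ring,
          msLoopA_shift t.length (a :: b :: t) 1 (((a :: b :: t).length : Int) - 2)
            (by rw [hlen]; push_cast; omega) le_rfl (by rw [hlen])]
        simp only [List.tail_cons]
        rw [show (1 : Int) - 1 = 0 from by ring,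
          show ((a :: b :: t).length : Int) - 2 - 1 = (((b :: t).dropLast.length : Int)) - 1
            from by rw [hlen, hd]; push_cast; ring]
      rw [hshift, ih (b :: t).dropLast (by rw [hlen] at hs; rw [hd]; omega)]
      have hh : PySem.List.pyGetD (a :: b :: t) 0 0 = a := by
        rw [pyGetD_eq_getElem _ 0 le_rfl (by simp)]
        rfl
      have hl : PySem.List.pyGetD (a :: b :: t) (((a :: b :: t).length : Int) - 1) 0 =
          (b :: t).getLastD 0 := by
        rw [pyGetD_eq_getElem _ _ (by rw [hlen]; push_cast; omega)
          (by rw [hlen]; omega), getLastD_cons_eq_getElem]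
        have hidx : (((a :: b :: t).length : Int) - 1).toNat = t.length + 1 := by
          rw [hlen]; omega
        simp only [hidx, List.getElem_cons_succ]
        rfl
      rw [hh, hl]
      conv_rhs => rw [gSpec]

-- B's loop computes gSpec of the sorted input.
lemma msLoopB_eq_g : ∀ (n : Nat) (xs : List Int), xs.length ≤ n →
    msLoopB xs = gSpec (PySem.List.sorted xs (fun x => x)) := by
  intro n
  induction n with
  | zero =>
    intro xs hxs
    have hnil : xs = [] := List.length_eq_zero_iff.mp (Nat.le_zero.mp hxs)
    subst hnil
    rw [msLoopB, (PySem.List.sorted_eq_nil_iff ([] : List Int) (fun x => x) false).mpr rfl]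
    norm_num [gSpec]
  | succ n ih =>
    intro xs hxs
    by_cases hx : xs = []
    · subst hx
      rw [msLoopB, (PySem.List.sorted_eq_nil_iff ([] : List Int) (fun x => x) false).mpr rfl]
      norm_num [gSpec]
    · rw [msLoopB, dif_neg hx]
      cases hmax : PySem.List.max? xs (fun x => x) with
      | none => exact absurd ((PySem.List.max?_eq_none_iff _ _).mp hmax) hx
      | some m =>
        have hmaxD : PySem.List.maxD xs (fun x => x) 0 = m := by
          simp [PySem.List.maxD, hmax]
        have hm : m ∈ xs := PySem.List.max?_mem hmax
        have hrem1 : PySem.List.remove? xs m = some (xs.erase m) :=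
          PySem.List.remove?_eq_some_erase xs m hm
        simp only [hmaxD, hrem1, Option.getD_some]
        have hsd : PySem.List.sorted (xs.erase m) (fun x => x) =
            (PySem.List.sorted xs (fun x => x)).dropLast := sorted_erase_max xs m hmax
        have hsne : PySem.List.sorted xs (fun x => x) ≠ [] := by
          rw [Ne, PySem.List.sorted_eq_nil_iff]; exact hx
        by_cases h1 : xs.erase m = []
        · rw [dif_pos h1]
          have hd : (PySem.List.sorted xs (fun x => x)).dropLast = [] := by
            rw [← hsd, h1, (PySem.List.sorted_eq_nil_iff _ _ _).mpr rfl]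
          have hs1 : (PySem.List.sorted xs (fun x => x)).length ≤ 1 := by
            have h' := congrArg List.length hd
            rw [List.length_dropLast] at h'
            simp only [List.length_nil] at h'
            omega
          obtain ⟨c, hc⟩ := List.length_eq_one_iff.mp (le_antisymm hs1
            (List.length_pos_iff.mpr hsne))
          have hmc : m ∈ PySem.List.sorted xs (fun x => x) :=
            (PySem.List.mem_sorted xs (fun x => x) false m).mpr hm
          rw [hc] at hmc
          simp at hmc
          rw [hc, ← hmc]
          norm_num [gSpec]
        · rw [dif_neg h1]
          cases hmin : PySem.List.min? (xs.erase m) (fun x => x) with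
          | none => exact absurd ((PySem.List.min?_eq_none_iff _ _).mp hmin) h1
          | some m2 =>
            have hminD : PySem.List.minD (xs.erase m) (fun x => x) 0 = m2 := by
              simp [PySem.List.minD, hmin]
            have hm2 : m2 ∈ xs.erase m := PySem.List.min?_mem hmin
            have hrem2 : PySem.List.remove? (xs.erase m) m2 = some ((xs.erase m).erase m2) :=
              PySem.List.remove?_eq_some_erase _ m2 hm2
            simp only [hminD, hrem2, Option.getD_some]
            have hsd2 : PySem.List.sorted ((xs.erase m).erase m2) (fun x => x) =
                (PySem.List.sorted xs (fun x => x)).dropLast.tail := by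
              rw [sorted_erase_min _ m2 hmin, hsd]
            have hihlen : ((xs.erase m).erase m2).length ≤ n := by
              have e1 : (xs.erase m).length = xs.length - 1 := List.length_erase_of_mem hm
              have e2 : ((xs.erase m).erase m2).length = (xs.erase m).length - 1 :=
                List.length_erase_of_mem hm2
              have : 0 < xs.length := List.length_pos_iff.mpr hx
              omega
            rw [ih _ hihlen, hsd2]
            have hdne : (PySem.List.sorted xs (fun x => x)).dropLast ≠ [] := by
              rw [← hsd, Ne, PySem.List.sorted_eq_nil_iff]; exact h1
            obtain ⟨a, t0, hat⟩ := List.exists_cons_of_ne_nil hsne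
            have ht0 : t0 ≠ [] := by
              rintro rfl
              rw [hat] at hdne
              simp at hdne
            obtain ⟨b, t, hbt⟩ := List.exists_cons_of_ne_nil ht0
            subst hbt
            rw [hat]
            have hdl : (a :: b :: t).dropLast = a :: (b :: t).dropLast := by
              rw [List.dropLast_cons_of_ne_nil (by simp)]
            have hlast : (b :: t).getLastD 0 = m := by
              have h' : (PySem.List.sorted xs (fun x => x)).getLast? = some m := by
                rw [List.getLast?_eq_getLast hsne, max_eq_getLast_sorted xs m hmax hsne]
              rw [hat, List.getLast?_cons_cons] at h'
              rw [List.getLastD_eq_getLast?, h', Option.getD_some]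
            have hhead : m2 = a := by
              have hsrem1 : PySem.List.sorted (xs.erase m) (fun x => x) =
                  a :: (b :: t).dropLast := by rw [hsd, hat, hdl]
              apply le_antisymm
              · exact PySem.List.min?_isMin hmin a
                  ((PySem.List.mem_sorted (xs.erase m) (fun x => x) false a).mp
                    (hsrem1 ▸ List.mem_cons_self))
              · exact PySem.List.key_head_sorted_le (xs.erase m) (fun x => x) hsrem1 m2 hm2
            rw [hdl]
            conv_rhs => rw [gSpec]
            rw [hlast, hhead]
            rfl

-- ===== VERDICT (by name: the statement is the Claim_ definition above) =====
theorem meanOrderSort_spec : Claim_equal_meanOrderSort := by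
  intro xs _
  unfold Spec_meanOrderSort meanOrderSort meanOrderSort_alt
  rw [msLoopA_eq_g (PySem.List.sorted xs (fun x => x)).length _ le_rfl,
    msLoopB_eq_g xs.length xs le_rfl]
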